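-- pv_equiv track=rewrite | github.com/PotasnikM/ANS-Web-App | ANS/tANS.py | tans_decode
-- ===== SOURCE A (Python) =====
-- def tans_decode(encoded_data, symbol_occurrences):
--     # Create a dictionary to hold the inverse of the codewords
--     inverse_codewords = {}
--     # Create a list of tuples representing each symbol with its occurrence count
--     symbol_counts = [(symbol, symbol_occurrences[symbol]) for symbol in symbol_occurrences]
--     # Sort the symbols in descending order of their occurrence count
--     symbol_counts = sorted(symbol_counts, key=lambda x: x[1], reverse=True)
--     # Calculate the maximum number of bits required to represent the codewords
--     max_bits = len(bin(len(symbol_counts) - 1)[2:])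
--     # Generate the prefix-free codewords for each symbol
--     for i in range(len(symbol_counts)):
--         binary_codeword = bin(i)[2:].zfill(max_bits)
--         symbol = symbol_counts[i][0]
--         inverse_codewords[binary_codeword] = symbol
--     # Decode the data using the inverse codewords
--     decoded_data = ''
--     current_codeword = ''
--     for bit in encoded_data:
--         current_codeword += bit
--         if current_codeword in inverse_codewords:
--             decoded_data += inverse_codewords[current_codeword]
--             current_codeword = ''
--     return decoded_data
-- ===== SOURCE B (Python) =====
-- def _build_inverse(symbol_occurrences):
--     # same table construction as the original: sort by count descending,
--     # fixed codeword width, zero-padded binary index -> symbol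
--     symbol_counts = sorted(symbol_occurrences.items(), key=lambda x: x[1], reverse=True)
--     max_bits = len(bin(len(symbol_counts) - 1)[2:])
--     inverse = {bin(i)[2:].zfill(max_bits): symbol_counts[i][0]
--                for i in range(len(symbol_counts))}
--     return inverse, max_bits
--
--
-- def tans_decode(encoded_data, symbol_occurrences):
--     inverse, max_bits = _build_inverse(symbol_occurrences)
--     symbols = []
--     for i in range(0, len(encoded_data), max_bits):
--         symbol = inverse.get(encoded_data[i:i + max_bits])
--         if symbol is None:
--             break
--         symbols.append(symbol)
--     return ''.join(symbols)
-- ===== Notes on version B (the rewrite author's own statement) =====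
-- stated objective: faster
-- what changed: B keeps A's codeword-table construction but replaces A's bit-by-bit decode loop (grow current_codeword one character at a time, probing dict membership after every bit, with the accumulator string growing without bound after a miss) with a direct chunked scan: step through encoded_data in fixed max_bits-wide slices, look each slice up once, and break on the first miss or short tail.
import Mathlib
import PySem

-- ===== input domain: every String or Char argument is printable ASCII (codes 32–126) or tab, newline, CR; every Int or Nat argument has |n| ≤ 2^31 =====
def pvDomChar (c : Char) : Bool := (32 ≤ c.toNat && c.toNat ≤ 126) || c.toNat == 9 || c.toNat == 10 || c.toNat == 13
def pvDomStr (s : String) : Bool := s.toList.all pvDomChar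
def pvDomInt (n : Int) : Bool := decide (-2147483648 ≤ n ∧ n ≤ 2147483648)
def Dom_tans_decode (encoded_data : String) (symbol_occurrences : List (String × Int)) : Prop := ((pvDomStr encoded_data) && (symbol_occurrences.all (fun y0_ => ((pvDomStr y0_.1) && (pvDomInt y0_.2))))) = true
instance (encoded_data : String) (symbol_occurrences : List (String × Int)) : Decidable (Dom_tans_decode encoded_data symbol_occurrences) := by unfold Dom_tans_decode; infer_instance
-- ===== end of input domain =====

-- B builds the same fixed-width codeword table but replaces A's bit-by-bit
-- accumulator decode loop by direct max_bits-wide chunk lookups (objective: idiomatic).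

-- ===== PORT A =====
-- literal transliteration of A: comprehension [(s, d[s]) for s in d], stable sort by
-- count descending, max_bits = len(bin(n-1)[2:]), insert loop over range(n), then
-- the bit-accumulating decode loop (state = (decoded_data, current_codeword)).
def tans_decode (encoded_data : String) (symbol_occurrences : List (String × Int)) : String :=
  let d := PySem.Dict.ofList symbol_occurrences
  let symbol_counts0 := d.keys.map (fun symbol => (symbol, d.getD symbol 0))
  let symbol_counts := PySem.List.sorted symbol_counts0 (fun x => x.2) true
  let max_bits := (PySem.List.slice (PySem.Int.toBinChars0b ((symbol_counts.length : Int) - 1)) (some 2) none).length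
  let inverse_codewords := (List.range symbol_counts.length).foldl (fun d i =>
      d.insert (PySem.Chars.zfill (PySem.List.slice (PySem.Int.toBinChars0b ((i : Nat) : Int)) (some 2) none) (max_bits : Int))
               (PySem.List.pyGetD symbol_counts (i : Int) ("", 0)).1) PySem.Dict.empty
  let r := encoded_data.toList.foldl (fun (st : List Char × List Char) bit =>
      let current_codeword := st.2 ++ [bit]
      match inverse_codewords.get? current_codeword with
      | some symbol => (st.1 ++ symbol.toList, [])
      | none => (st.1, current_codeword)) ([], [])
  String.ofList r.1

-- ===== PORT B =====
-- _build_inverse of Source B: same codeword table (sorted items, fixed width, dict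
-- comprehension over range(n)), returned together with max_bits.
def tansBuildInverse (symbol_occurrences : List (String × Int)) : PySem.Dict (List Char) String × Nat :=
  let symbol_counts := PySem.List.sorted (PySem.Dict.ofList symbol_occurrences).items (fun x => x.2) true
  let max_bits := (PySem.List.slice (PySem.Int.toBinChars0b ((symbol_counts.length : Int) - 1)) (some 2) none).length
  ((List.range symbol_counts.length).foldl (fun d i =>
      d.insert (PySem.Chars.zfill (PySem.List.slice (PySem.Int.toBinChars0b ((i : Nat) : Int)) (some 2) none) (max_bits : Int))
               (PySem.List.pyGetD symbol_counts (i : Int) ("", 0)).1) PySem.Dict.empty, max_bits)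

-- Source B's loop 'for i in range(0, len(encoded_data), max_bits)' as recursion on the
-- remaining bits: look up the next max_bits-wide slice, break on a miss.  The
-- '0 < m' conjunct of the guard only makes the recursion total (m ≥ 1 always holds).
def tansChunks (inv : PySem.Dict (List Char) String) (m : Nat) (bits : List Char) : List Char :=
  if bits ≠ [] ∧ 0 < m then
    match inv.get? (bits.take m) with
    | some symbol => symbol.toList ++ tansChunks inv m (bits.drop m)
    | none => []
  else []
termination_by bits.length
decreasing_by
  rename_i h
  rcases h with ⟨hne, hm⟩
  have : 0 < bits.length := List.length_pos_iff.mpr hne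
  simp [List.length_drop]; omega

def tans_decode_alt (encoded_data : String) (symbol_occurrences : List (String × Int)) : String :=
  let p := tansBuildInverse symbol_occurrences
  String.ofList (tansChunks p.1 p.2 encoded_data.toList)

-- ===== PRECONDITION & SPEC =====
def Spec_tans_decode (encoded_data : String) (symbol_occurrences : List (String × Int)) (out : String) : Prop := out = tans_decode_alt encoded_data symbol_occurrences
instance (encoded_data : String) (symbol_occurrences : List (String × Int)) (out : String) : Decidable (Spec_tans_decode encoded_data symbol_occurrences out) := by unfold Spec_tans_decode; infer_instance

-- ===== CLAIM (what is proved, stated in full; the proofs are below) =====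
def Claim_equal_tans_decode : Prop := ∀ (encoded_data : String) (symbol_occurrences : List (String × Int)), Dom_tans_decode encoded_data symbol_occurrences → Spec_tans_decode encoded_data symbol_occurrences (tans_decode encoded_data symbol_occurrences)

-- ===== LEMMAS AND PROOFS =====

lemma pv_toDigitsCore_two_length :
    ∀ n : Nat, ∀ f l, n < f → (Nat.toDigitsCore 2 f n l).length = Nat.log2 n + 1 + l.length := by
  intro n
  induction n using Nat.strong_induction_on with
  | _ n ih =>
    intro f l hf
    match f with
    | f + 1 =>
      rw [Nat.toDigitsCore]
      by_cases h : n / 2 = 0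
      · have hn : n < 2 := by omega
        have hl : Nat.log2 n = 0 := by
          simp only [Nat.log2_eq_log_two]
          exact Nat.log_eq_zero_iff.mpr (Or.inl hn)
        simp [h, hl]; omega
      · have hn : 2 ≤ n := by omega
        simp only [h, if_false]
        rw [ih (n/2) (by omega) f _ (by omega)]
        have hl : Nat.log2 n = Nat.log2 (n/2) + 1 := by
          simp only [Nat.log2_eq_log_two, Nat.log_div_base]
          have := Nat.log_pos (by omega : 1 < 2) hn
          omega
        simp [hl]
        omega

lemma pv_toDigits_two_length (n : Nat) : (Nat.toDigits 2 n).length = Nat.log2 n + 1 := by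
  have := pv_toDigitsCore_two_length n (n+1) [] (by omega)
  simpa [Nat.toDigits] using this

-- slice [2:] of bin(i) for i ≥ 0 is the digit list
lemma pv_slice_bin_nonneg (i : Nat) :
    PySem.List.slice (PySem.Int.toBinChars0b ((i : Nat) : Int)) (some 2) none = Nat.toDigits 2 i := by
  rw [PySem.List.slice_from _ (by omega : (0:Int) ≤ 2)]
  have h0 : ¬(((i:Nat):Int) < 0) := by omega
  simp [PySem.Int.toBinChars0b, h0]

lemma pv_maxbits_pos (symbol_occurrences : List (String × Int)) :
    0 < (tansBuildInverse symbol_occurrences).2 := by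
  unfold tansBuildInverse
  simp only
  rw [PySem.List.slice_from _ (by omega : (0:Int) ≤ 2)]
  set n := (PySem.List.sorted (PySem.Dict.ofList symbol_occurrences).items (fun x => x.2) true).length with hn
  by_cases h : n = 0
  · norm_num [h, PySem.Int.toBinChars0b, pv_toDigits_two_length]
  · have he : ((n:Int) - 1) = ((n-1 : Nat) : Int) := by omega
    rw [he]
    have h0 : ¬(((n-1:Nat):Int) < 0) := by omega
    simp [PySem.Int.toBinChars0b, h0, pv_toDigits_two_length]

lemma pv_key_mem_len (symbol_occurrences : List (String × Int)) (c : List Char)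
    (hc : c ∈ (tansBuildInverse symbol_occurrences).1.keys) :
    c.length = (tansBuildInverse symbol_occurrences).2 := by
  unfold tansBuildInverse at *
  simp only at *
  rw [PySem.Dict.keys_foldl_insert_key] at hc
  set sc := PySem.List.sorted (PySem.Dict.ofList symbol_occurrences).items (fun x => x.2) true with hsc
  set m := (PySem.List.slice (PySem.Int.toBinChars0b ((sc.length : Int) - 1)) (some 2) none).length with hm
  have hc' : c ∈ ((List.range sc.length).map
      (fun i => PySem.Chars.zfill (PySem.List.slice (PySem.Int.toBinChars0b ((i : Nat) : Int)) (some 2) none) (m : Int))) := by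
    have := (PySem.Set.mem_ofList _ c).mp (by simpa [PySem.Set.update, PySem.Set.ofList] using hc)
    exact this
  obtain ⟨i, hi, rfl⟩ := List.mem_map.mp hc'
  have hiR := List.mem_range.mp hi
  have hn1 : 1 ≤ sc.length := by omega
  have hmval : m = Nat.log2 (sc.length - 1) + 1 := by
    rw [hm]
    have : ((sc.length:Int) - 1) = ((sc.length-1 : Nat) : Int) := by omega
    rw [this, pv_slice_bin_nonneg, pv_toDigits_two_length]
  rw [PySem.Chars.length_zfill, pv_slice_bin_nonneg, pv_toDigits_two_length]
  have hmono : Nat.log2 i ≤ Nat.log2 (sc.length - 1) := by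
    simp only [Nat.log2_eq_log_two]; exact Nat.log_mono_right (by omega)
  simp only [Int.toNat_natCast]
  omega

lemma pv_get?_none_of_length_ne (symbol_occurrences : List (String × Int)) (c : List Char)
    (hc : c.length ≠ (tansBuildInverse symbol_occurrences).2) :
    (tansBuildInverse symbol_occurrences).1.get? c = none := by
  rw [PySem.Dict.get?_eq_none_iff_not_mem_keys]
  intro hmem
  exact hc (pv_key_mem_len _ _ hmem)

lemma pv_tansChunks_char (inv : PySem.Dict (List Char) String) (m : Nat) (hm : 0 < m)
    (P : ∀ c : List Char, c.length ≠ m → inv.get? c = none) (bits : List Char) :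
    tansChunks inv m bits =
      if m ≤ bits.length then
        (match inv.get? (bits.take m) with
         | some symbol => symbol.toList ++ tansChunks inv m (bits.drop m)
         | none => [])
      else [] := by
  rw [tansChunks]
  by_cases hne : bits = []
  · subst hne
    rw [if_neg (by simp), if_neg (by simp; omega)]
  · rw [if_pos ⟨hne, hm⟩]
    by_cases hlen : m ≤ bits.length
    · rw [if_pos hlen]
    · rw [if_neg hlen]
      have : (bits.take m).length ≠ m := by
        have : 0 < bits.length := List.length_pos_iff.mpr hne
        simp [List.length_take]; omega
      rw [P _ this]

lemma pv_stuck (inv : PySem.Dict (List Char) String) (m : Nat)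
    (P : ∀ c : List Char, c.length ≠ m → inv.get? c = none) :
    ∀ (bits cur dec : List Char), m ≤ cur.length →
      (bits.foldl (fun (st : List Char × List Char) bit =>
        let current := st.2 ++ [bit]
        match inv.get? current with
        | some symbol => (st.1 ++ symbol.toList, [])
        | none => (st.1, current)) (dec, cur)).1 = dec := by
  intro bits
  induction bits with
  | nil => intro cur dec _; rfl
  | cons b rest ih =>
    intro cur dec hcur
    simp only [List.foldl_cons]
    have hne : (cur ++ [b]).length ≠ m := by simp; omega
    rw [P _ hne]
    exact ih (cur ++ [b]) dec (by simp; omega)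

lemma pv_fold_eq_chunks (inv : PySem.Dict (List Char) String) (m : Nat) (hm : 0 < m)
    (P : ∀ c : List Char, c.length ≠ m → inv.get? c = none) :
    ∀ (bits cur dec : List Char), cur.length < m →
      (bits.foldl (fun (st : List Char × List Char) bit =>
        let current := st.2 ++ [bit]
        match inv.get? current with
        | some symbol => (st.1 ++ symbol.toList, [])
        | none => (st.1, current)) (dec, cur)).1 =
      dec ++ (if m ≤ cur.length + bits.length then
        (match inv.get? (cur ++ bits.take (m - cur.length)) with
         | some symbol => symbol.toList ++ tansChunks inv m (bits.drop (m - cur.length))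
         | none => [])
      else []) := by
  intro bits
  induction bits with
  | nil =>
    intro cur dec hcur
    rw [if_neg (by simp; omega)]
    simp
  | cons b rest ih =>
    intro cur dec hcur
    simp only [List.foldl_cons]
    by_cases hfull : cur.length + 1 = m
    · -- the accumulator reaches width m at this bit
      have htake : cur ++ (b :: rest).take (m - cur.length) = cur ++ [b] := by
        have : m - cur.length = 1 := by omega
        simp [this]
      have hdrop : (b :: rest).drop (m - cur.length) = rest := by
        have : m - cur.length = 1 := by omega
        simp [this]
      rw [if_pos (by simp; omega), htake, hdrop]
      cases hget : inv.get? (cur ++ [b]) with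
      | some symbol =>
        rw [ih [] (dec ++ symbol.toList) (by simpa using hm)]
        rw [pv_tansChunks_char inv m hm P rest]
        by_cases hr : m ≤ rest.length
        · rw [if_pos (by simpa using hr), if_pos hr]
          simp
        · rw [if_neg (by simpa using hr), if_neg hr]
          simp
      | none =>
        rw [pv_stuck inv m P rest (cur ++ [b]) dec (by simp; omega)]
        simp
    · -- still short of m bits: the lookup misses by length
      have hne : (cur ++ [b]).length ≠ m := by simp; omega
      rw [P _ hne]
      rw [ih (cur ++ [b]) dec (by simp; omega)]
      have e1 : cur ++ [b] ++ rest.take (m - (cur ++ [b]).length)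
          = cur ++ (b :: rest).take (m - cur.length) := by
        have h1 : m - cur.length = (m - (cur.length + 1)) + 1 := by omega
        simp [h1, List.take_succ_cons]
      have e2 : rest.drop (m - (cur ++ [b]).length) = (b :: rest).drop (m - cur.length) := by
        have h1 : m - cur.length = (m - (cur.length + 1)) + 1 := by omega
        simp [h1, List.drop_succ_cons]
      rw [e1, e2]
      congr 1
      have : ((cur ++ [b]).length + rest.length) = cur.length + (b :: rest).length := by simp; omega
      rw [this]


-- A's comprehension [(s, d[s]) for s in d] is exactly d.items
lemma pv_tableA_eq (symbol_occurrences : List (String × Int)) :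
    ((PySem.Dict.ofList symbol_occurrences).keys.map
        (fun symbol => (symbol, (PySem.Dict.ofList symbol_occurrences).getD symbol 0)))
      = (PySem.Dict.ofList symbol_occurrences).items :=
  (PySem.Dict.items_eq_map_keys _ (PySem.Dict.nodup_keys_ofList _) 0).symm

-- ===== VERDICT (by name: the statement is the Claim_ definition above) =====
theorem tans_decode_spec : Claim_equal_tans_decode := by
  intro encoded_data symbol_occurrences _
  unfold Spec_tans_decode tans_decode tans_decode_alt
  simp only [pv_tableA_eq]
  have hm := pv_maxbits_pos symbol_occurrences
  have P := pv_get?_none_of_length_ne symbol_occurrences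
  simp only [tansBuildInverse] at hm P ⊢
  rw [pv_fold_eq_chunks _ _ hm P encoded_data.toList [] [] (by simpa using hm)]
  rw [pv_tansChunks_char _ _ hm P encoded_data.toList]
  simp
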